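-- pv_equiv track=rewrite | github.com/tifat58/mixed-cbm-with-trees | utils/util.py | create_group_indices
-- ===== SOURCE A (Python) =====
-- def create_group_indices(concept_groups, squeeze_double=True):
--     """
--     Create a mapping from concept group names to indices.
--
--     Parameters:
--     - concept_groups (dict): A dictionary of concept groups.
--
--     Returns:
--     - group_indices (dict): A dictionary mapping group names to their concept indices.
--     """
--     group_indices = {}
--     current_index = 0
--     current_group_index = 0
--
--     for group_name, concepts in concept_groups.items():
--         num_concepts = len(concepts)
--         if num_concepts == 2 and squeeze_double:
--             group_indices[current_group_index] = [current_index]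
--             current_index += 1
--         elif num_concepts == 2 and squeeze_double == False:
--             group_indices[current_group_index] = [current_index, current_index]
--             current_index += 1
--         else:
--             group_indices[current_group_index] = list(range(current_index, current_index + num_concepts))
--             current_index += num_concepts
--         current_group_index += 1
--
--     return group_indices
-- ===== SOURCE B (Python) =====
-- def create_group_indices(concept_groups, squeeze_double=True):
--     sizes = [len(concepts) for concepts in concept_groups.values()]
--     starts = [0]
--     for n in sizes:
--         starts.append(starts[-1] + (1 if n == 2 else n))
--     group_indices = {}
--     for i, (n, s) in enumerate(zip(sizes, starts)):
--         if n == 2: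
--             group_indices[i] = [s] if squeeze_double else [s, s]
--         else:
--             group_indices[i] = list(range(s, s + n))
--     return group_indices
-- ===== Notes on version B (the rewrite author's own statement) =====
-- stated objective: alternative
-- what changed: B replaces A's single loop carrying a running index/dict state by two phases: a prefix-sum pass computing every group's start offset, then an independent per-group emission keyed by enumerate over zip(sizes, starts).
import Mathlib
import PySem

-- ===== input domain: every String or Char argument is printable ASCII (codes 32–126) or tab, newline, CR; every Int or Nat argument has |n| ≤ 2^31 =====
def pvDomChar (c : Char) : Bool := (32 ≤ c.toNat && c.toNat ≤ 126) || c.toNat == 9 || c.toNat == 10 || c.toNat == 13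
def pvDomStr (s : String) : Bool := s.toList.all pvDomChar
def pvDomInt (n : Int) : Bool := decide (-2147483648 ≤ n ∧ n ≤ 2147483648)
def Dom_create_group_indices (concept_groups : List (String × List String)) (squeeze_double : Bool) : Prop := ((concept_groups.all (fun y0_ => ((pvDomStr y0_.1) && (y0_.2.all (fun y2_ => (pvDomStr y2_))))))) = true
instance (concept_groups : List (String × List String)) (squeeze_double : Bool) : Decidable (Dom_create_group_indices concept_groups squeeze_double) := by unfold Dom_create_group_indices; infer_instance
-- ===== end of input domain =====

-- B replaces A's single stateful loop by a prefix-sum pass for the start offsets plus an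
-- independent per-group emission pass (objective: alternative decomposition, same cost).

-- ===== PORT A =====
def create_group_indices (concept_groups : List (String × List String)) (squeeze_double : Bool) : List (Int × List Int) :=
  (concept_groups.foldl
    (fun (st : PySem.Dict Int (List Int) × Int × Int) gp =>
      let num_concepts : Int := gp.2.length
      if num_concepts = 2 ∧ squeeze_double = true then
        (st.1.insert st.2.2 [st.2.1], st.2.1 + 1, st.2.2 + 1)
      else if num_concepts = 2 ∧ squeeze_double = false then
        (st.1.insert st.2.2 [st.2.1, st.2.1], st.2.1 + 1, st.2.2 + 1)
      else
        (st.1.insert st.2.2 (PySem.List.pyRange st.2.1 (st.2.1 + num_concepts) 1),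
         st.2.1 + num_concepts, st.2.2 + 1))
    (PySem.Dict.empty, 0, 0)).1.items

-- ===== PORT B =====
def create_group_indices_alt (concept_groups : List (String × List String)) (squeeze_double : Bool) : List (Int × List Int) :=
  let sizes : List Int := concept_groups.map (fun gp => (gp.2.length : Int))
  let starts : List Int :=
    sizes.foldl (fun acc n => acc ++ [PySem.List.pyGetD acc (-1) 0 + (if n = 2 then 1 else n)]) [0]
  (PySem.List.enumerate (sizes.zip starts) 0).map
    (fun p =>
      (p.1, if p.2.1 = 2 then (if squeeze_double then [p.2.2] else [p.2.2, p.2.2])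
            else PySem.List.pyRange p.2.2 (p.2.2 + p.2.1) 1))

-- ===== PRECONDITION & SPEC =====
def Spec_create_group_indices (concept_groups : List (String × List String)) (squeeze_double : Bool) (out : List (Int × List Int)) : Prop := out = create_group_indices_alt concept_groups squeeze_double
instance (concept_groups : List (String × List String)) (squeeze_double : Bool) (out : List (Int × List Int)) : Decidable (Spec_create_group_indices concept_groups squeeze_double out) := by unfold Spec_create_group_indices; infer_instance

-- ===== CLAIM (what is proved, stated in full; the proofs are below) =====
def Claim_equal_create_group_indices : Prop := ∀ (concept_groups : List (String × List String)) (squeeze_double : Bool), Dom_create_group_indices concept_groups squeeze_double → Spec_create_group_indices concept_groups squeeze_double (create_group_indices concept_groups squeeze_double)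

-- ===== LEMMAS AND PROOFS =====

-- reference shape both ports are reduced to
def cgiBuild (sq : Bool) : List Int → Int → Int → List (Int × List Int)
  | [], _, _ => []
  | n :: ns, ci, gi =>
      (gi, if n = 2 then (if sq then [ci] else [ci, ci]) else PySem.List.pyRange ci (ci + n) 1)
        :: cgiBuild sq ns (ci + (if n = 2 then 1 else n)) (gi + 1)

-- scanl-shaped prefix sums of the advance amounts
def cgiSc : Int → List Int → List Int
  | l, [] => [l]
  | l, n :: ns => l :: cgiSc (l + (if n = 2 then 1 else n)) ns

theorem cgiA_loop (sq : Bool) (cg : List (String × List String))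
    (d : PySem.Dict Int (List Int)) (ci gi : Int) (h : ∀ k ∈ d.keys, k < gi) :
    (cg.foldl
      (fun (st : PySem.Dict Int (List Int) × Int × Int) gp =>
        let num_concepts : Int := gp.2.length
        if num_concepts = 2 ∧ sq = true then
          (st.1.insert st.2.2 [st.2.1], st.2.1 + 1, st.2.2 + 1)
        else if num_concepts = 2 ∧ sq = false then
          (st.1.insert st.2.2 [st.2.1, st.2.1], st.2.1 + 1, st.2.2 + 1)
        else
          (st.1.insert st.2.2 (PySem.List.pyRange st.2.1 (st.2.1 + num_concepts) 1),
           st.2.1 + num_concepts, st.2.2 + 1))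
      (d, ci, gi)).1.items
    = d.items ++ cgiBuild sq (cg.map (fun gp => (gp.2.length : Int))) ci gi := by
  induction cg generalizing d ci gi with
  | nil => simp [cgiBuild]
  | cons gp cg ih =>
    have hfresh : d.contains gi = false := by
      by_contra hc
      have : gi ∈ d.keys := (PySem.Dict.contains_iff_mem_keys d gi).1 (by
        cases hcc : d.contains gi with
        | false => exact absurd hcc hc
        | true => rfl)
      exact absurd (h gi this) (lt_irrefl gi)
    have hkeys : ∀ v, ∀ k ∈ (d.insert gi v).keys, k < gi + 1 := by
      intro v k hk
      rcases (PySem.Dict.mem_keys_insert d gi k v).1 hk with rfl | hk'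
      · omega
      · exact lt_trans (h k hk') (by omega)
    have hitems : ∀ v, (d.insert gi v).items = d.items ++ [(gi, v)] :=
      fun v => PySem.Dict.items_insert_of_not_contains d v hfresh
    simp only [List.foldl_cons]
    split_ifs with ha hb
    · rw [ih _ _ _ (hkeys _), hitems, List.map_cons, cgiBuild]
      simp [ha.1, ha.2]
    · rw [ih _ _ _ (hkeys _), hitems, List.map_cons, cgiBuild]
      simp [hb.1, hb.2]
    · have h2 : (gp.2.length : Int) ≠ 2 := by
        cases sq <;> tauto
      rw [ih _ _ _ (hkeys _), hitems, List.map_cons, cgiBuild]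
      simp [h2]

theorem cgiStarts (ns : List Int) (pre : List Int) (l : Int) :
    ns.foldl (fun acc n => acc ++ [PySem.List.pyGetD acc (-1) 0 + (if n = 2 then 1 else n)])
      (pre ++ [l])
    = pre ++ cgiSc l ns := by
  induction ns generalizing pre l with
  | nil => simp [cgiSc]
  | cons n ns ih =>
    simp only [List.foldl_cons, PySem.List.pyGetD_neg_one_append_singleton]
    rw [ih (pre ++ [l]) (l + (if n = 2 then 1 else n))]
    simp [cgiSc]

theorem cgiB_loop (sq : Bool) (ns : List Int) (ci gi : Int) :
    (PySem.List.enumerate (ns.zip (cgiSc ci ns)) gi).map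
      (fun p =>
        (p.1, if p.2.1 = 2 then (if sq then [p.2.2] else [p.2.2, p.2.2])
              else PySem.List.pyRange p.2.2 (p.2.2 + p.2.1) 1))
    = cgiBuild sq ns ci gi := by
  induction ns generalizing ci gi with
  | nil => simp [cgiSc, cgiBuild, PySem.List.enumerate_nil]
  | cons n ns ih =>
    simp only [cgiSc, List.zip_cons_cons, PySem.List.enumerate_cons, List.map_cons, cgiBuild]
    rw [ih]

-- ===== VERDICT (by name: the statement is the Claim_ definition above) =====
theorem create_group_indices_spec : Claim_equal_create_group_indices := by
  intro cg sq _
  unfold Spec_create_group_indices create_group_indices create_group_indices_alt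
  dsimp only
  rw [cgiA_loop sq cg PySem.Dict.empty 0 0 (by simp)]
  have h0 : ([] : List Int) ++ [(0 : Int)] = [0] := rfl
  rw [← h0, cgiStarts, List.nil_append, cgiB_loop]
  simp [PySem.Dict.empty]
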